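-- pv_equiv track=rewrite | github.com/gogagubi/Codility-Python | Lesson_13_fibonacci_numbers/Lesson_13_Ladder.py | solution
-- ===== SOURCE A (Python) =====
-- def solution(A, B):
--     N = len(A)
--     maxEl = max(A)
--
--     fibonacci = [0] * (maxEl + 1)
--     fibonacci[0] = fibonacci[1] = 1
--
--     for i in range(2, len(fibonacci)):
--         fibonacci[i] = (fibonacci[i - 2] + fibonacci[i - 1]) & ((1 << 30) - 1)
--
--     result = [0] * N
--     for i in range(0, N):
--         result[i] = fibonacci[A[i]] & ((1 << B[i]) - 1)
--
--     return result
-- ===== SOURCE B (Python) =====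
-- def solution(A, B):
--     # Sorted sweep: process queries in increasing A[i] order, generating the
--     # masked Fibonacci sequence with two rolling variables instead of a table.
--     MASK = (1 << 30) - 1
--     order = sorted(range(len(A)), key=lambda i: A[i])
--     result = [0] * len(A)
--     f_prev, f_curr = 0, 1  # f_curr = F(k), F(0) = F(1) = 1 (masked)
--     k = 0
--     for i in order:
--         while k < A[i]:
--             f_prev, f_curr = f_curr, (f_prev + f_curr) & MASK
--             k += 1
--         result[i] = f_curr & ((1 << B[i]) - 1)
--     return result
-- ===== Notes on version B (the rewrite author's own statement) =====
-- stated objective: alternative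
-- what changed: Replaces the full O(maxEl) Fibonacci table with random-access lookups by a sorted sweep over the queries that keeps only two rolling masked Fibonacci variables, writing each answer back to its original position.
-- outside the precondition, e.g. on solution([2, -1], [3, 3]): A returns [2, 2], B returns [2, 1]
import Mathlib
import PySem

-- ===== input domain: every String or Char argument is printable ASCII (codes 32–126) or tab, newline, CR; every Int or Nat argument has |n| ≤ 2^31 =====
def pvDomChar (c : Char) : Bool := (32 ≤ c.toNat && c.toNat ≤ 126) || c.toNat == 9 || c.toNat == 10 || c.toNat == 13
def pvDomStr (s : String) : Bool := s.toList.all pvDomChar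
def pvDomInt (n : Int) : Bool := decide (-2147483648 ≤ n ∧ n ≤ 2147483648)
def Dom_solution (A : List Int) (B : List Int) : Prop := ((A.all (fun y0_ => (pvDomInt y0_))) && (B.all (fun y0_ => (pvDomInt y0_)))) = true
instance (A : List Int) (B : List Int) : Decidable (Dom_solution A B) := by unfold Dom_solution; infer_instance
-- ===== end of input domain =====

-- B replaces A's full O(maxEl) Fibonacci table + random-access lookups by a sorted
-- sweep over the queries with two rolling (masked) Fibonacci variables (objective:
-- alternative — O(N) extra state instead of O(maxEl)).

-- ===== PORT A =====
-- fibonacci[i] = (fibonacci[i-2] + fibonacci[i-1]) & ((1 << 30) - 1)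
-- (the table is an Array so the port evaluates; the loop index i runs over
-- range(2, len(fibonacci)), so i, i-1, i-2 are nonnegative in-range indices
-- and plain Nat indexing is exact here)
def pvTblStep (f : Array Int) (i : Int) : Array Int :=
  f.setIfInBounds i.toNat
    (PySem.Int.band ((f[(i - 2).toNat]?).getD 0 + (f[(i - 1).toNat]?).getD 0)
      ((1 <<< 30) - 1))

-- result[i] = fibonacci[A[i]] & ((1 << B[i]) - 1)
def pvResStep (fib : Array Int) (A B : List Int) (r : List Int) (i : Int) : List Int :=
  PySem.List.pySetD r i
    (PySem.Int.band (PySem.List.pyGetD fib.toList (PySem.List.pyGetD A i 0) 0)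
      ((1 <<< (PySem.List.pyGetD B i 0).toNat) - 1))

def solution (A : List Int) (B : List Int) : List Int :=
  let N := A.length
  let maxEl := (PySem.List.max? A (fun x => x)).getD 0
  let fib0 : Array Int := Array.replicate (maxEl + 1).toNat 0
  let fib1 := (fib0.setIfInBounds 0 1).setIfInBounds 1 1
  let fib := (PySem.List.pyRange 2 (fib1.size : Int) 1).foldl pvTblStep fib1
  (PySem.List.pyRange 0 (N : Int) 1).foldl (pvResStep fib A B) (List.replicate N 0)

-- ===== PORT B =====
-- f_prev, f_curr = f_curr, (f_prev + f_curr) & MASK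
def pvFibStep (p : Int × Int) : Int × Int :=
  (p.2, PySem.Int.band (p.1 + p.2) ((1 <<< 30) - 1))

-- one iteration of B's 'for i in order' loop; the while loop runs (A[i] - k) times
def pvSweepStep (A B : List Int) (st : Int × (Int × Int) × List Int) (i : Int) :
    Int × (Int × Int) × List Int :=
  let t := PySem.List.pyGetD A i 0
  let n := (t - st.1).toNat
  let p := pvFibStep^[n] st.2.1
  (st.1 + (n : Int), p,
    PySem.List.pySetD st.2.2 i
      (PySem.Int.band p.2 ((1 <<< (PySem.List.pyGetD B i 0).toNat) - 1)))

def solution_alt (A : List Int) (B : List Int) : List Int :=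
  let order := PySem.List.sorted (PySem.List.pyRange 0 (A.length : Int) 1)
      (fun i => PySem.List.pyGetD A i 0) false
  (order.foldl (pvSweepStep A B)
      ((0 : Int), ((0 : Int), (1 : Int)), List.replicate A.length (0 : Int))).2.2

-- ===== PRECONDITION & SPEC =====
-- Pre_ restricts to the problem's natural domain (Codility Ladder: rung counts ≥ 0 with at
-- least one positive, exponents ≥ 0, B at least as long as A): outside it A raises
-- (empty A, all-zero A, negative B[i], short B) or, for negative A[i], returns an
-- accidental negative-index wraparound into the fibonacci table.
def Pre_solution (A : List Int) (B : List Int) : Prop :=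
  A ≠ [] ∧ (∀ a ∈ A, 0 ≤ a) ∧ (∃ a ∈ A, 1 ≤ a) ∧ A.length ≤ B.length ∧
    (∀ b ∈ B.take A.length, 0 ≤ b)
instance (A : List Int) (B : List Int) : Decidable (Pre_solution A B) := by
  unfold Pre_solution; infer_instance
def pvWitness_solution : List Int × List Int := ([1, 2, 3], [1, 2, 3])

def Spec_solution (A : List Int) (B : List Int) (out : List Int) : Prop := out = solution_alt A B
instance (A : List Int) (B : List Int) (out : List Int) : Decidable (Spec_solution A B out) := by unfold Spec_solution; infer_instance

-- ===== CLAIM (what is proved, stated in full; the proofs are below) =====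
def Claim_equal_solution : Prop := ∀ (A : List Int) (B : List Int), Dom_solution A B → Pre_solution A B → Spec_solution A B (solution A B)

-- ===== LEMMAS AND PROOFS =====

-- the masked Fibonacci sequence both programs generate
def pvFib : Nat → Int
  | 0 => 1
  | 1 => 1
  | n + 2 => PySem.Int.band (pvFib n + pvFib (n + 1)) ((1 <<< 30) - 1)

def pvPair : Nat → Int × Int
  | 0 => (0, 1)
  | n + 1 => (pvFib n, pvFib (n + 1))

lemma pvIter (n : Nat) : pvFibStep^[n] (0, 1) = pvPair n := by
  induction n with
  | zero => rfl
  | succ m ih =>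
    rw [Function.iterate_succ_apply', ih]
    cases m with
    | zero => decide
    | succ k => rfl

lemma pvPair_snd (n : Nat) : (pvPair n).2 = pvFib n := by
  cases n <;> rfl

-- the per-index value both programs store
def pvVal (A B : List Int) (i : Int) : Int :=
  PySem.Int.band (pvFib (PySem.List.pyGetD A i 0).toNat)
    ((1 <<< (PySem.List.pyGetD B i 0).toNat) - 1)

lemma pvFoldl_size (l : List Int) (init : Array Int) :
    (l.foldl pvTblStep init).size = init.size := by
  induction l generalizing init with
  | nil => rfl
  | cons x xs ih => simp [List.foldl, ih, pvTblStep]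

-- table correctness: after processing range(2, m) the table holds pvFib below m
lemma pvTbl (sz : Nat) (init : Array Int)
    (hinit : init = ((Array.replicate sz (0 : Int)).setIfInBounds 0 1).setIfInBounds 1 1) :
    ∀ (d : Nat), 2 + d ≤ sz → ∀ j : Nat, j < sz →
      ((PySem.List.pyRange 2 ((2 + d : Nat) : Int) 1).foldl pvTblStep init)[j]? =
        some (if j < 2 + d then pvFib j else 0) := by
  intro d
  induction d with
  | zero =>
    intro _ j hj
    rw [show ((2 + 0 : Nat) : Int) = 2 by norm_num, PySem.List.pyRange_one_eq_nil (by omega)]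
    subst hinit
    simp only [List.foldl_nil]
    rw [Array.getElem?_setIfInBounds, Array.getElem?_setIfInBounds, Array.getElem?_replicate]
    by_cases h1 : j = 1
    · subst h1
      rw [if_pos rfl, if_pos (by simp; omega)]
      simp [pvFib]
    · by_cases h0 : j = 0
      · subst h0
        rw [if_neg (by omega), if_pos rfl, if_pos (by simp; omega)]
        simp [pvFib]
      · rw [if_neg (by omega), if_neg (by omega), if_pos hj, if_neg (by omega)]
  | succ m ih =>
    intro hle j hj
    have hT := ih (by omega)
    have hlen : ((PySem.List.pyRange 2 ((2 + m : Nat) : Int) 1).foldl pvTblStep init).size = sz := by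
      rw [pvFoldl_size]; subst hinit; simp
    set T := (PySem.List.pyRange 2 ((2 + m : Nat) : Int) 1).foldl pvTblStep init with hTdef
    have hpeel : PySem.List.pyRange 2 ((2 + (m+1) : Nat) : Int) 1
        = PySem.List.pyRange 2 ((2 + m : Nat) : Int) 1 ++ [((2 + m : Nat) : Int)] := by
      rw [show ((2 + (m+1) : Nat) : Int) = ((2 + m : Nat) : Int) + 1 by push_cast; ring]
      exact PySem.List.pyRange_one_succ_right (by push_cast; omega)
    rw [hpeel, List.foldl_append, List.foldl_cons, List.foldl_nil, ← hTdef]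
    -- step at index 2+m
    have hg2 : (T[((((2 + m : Nat) : Int)) - 2).toNat]?).getD 0 = pvFib m := by
      rw [show ((((2 + m : Nat) : Int)) - 2).toNat = m by omega]
      have := hT m (by omega)
      simp [this]
    have hg1 : (T[((((2 + m : Nat) : Int)) - 1).toNat]?).getD 0 = pvFib (m + 1) := by
      rw [show ((((2 + m : Nat) : Int)) - 1).toNat = m + 1 by omega]
      have := hT (m + 1) (by omega)
      simp [this]
      intro h
      exact absurd h (by omega)
    rw [pvTblStep, hg2, hg1,
      show (((2 + m : Nat) : Int)).toNat = 2 + m by omega]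
    have hv : PySem.Int.band (pvFib m + pvFib (m + 1)) ((1 <<< 30) - 1) = pvFib (m + 2) := rfl
    rw [hv, Array.getElem?_setIfInBounds]
    by_cases hje : j = 2 + m
    · subst hje
      rw [if_pos rfl, if_pos (by omega), if_pos (by omega), Nat.add_comm 2 m]
    · rw [if_neg (by omega), hT j hj]
      congr 1
      by_cases h1 : j < 2 + m
      · rw [if_pos h1, if_pos (by omega)]
      · rw [if_neg h1, if_neg (by omega)]

lemma pvTbl_final (sz : Nat) (hsz : 2 ≤ sz) (init : Array Int)
    (hinit : init = ((Array.replicate sz (0 : Int)).setIfInBounds 0 1).setIfInBounds 1 1)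
    (j : Nat) (hj : j < sz) :
    ((PySem.List.pyRange 2 (sz : Int) 1).foldl pvTblStep init)[j]? = some (pvFib j) := by
  have := pvTbl sz init hinit (sz - 2) (by omega) j hj
  rw [show ((2 + (sz - 2) : Nat) : Int) = (sz : Int) by omega] at this
  rw [this, if_pos (by omega)]

-- generic: folding "set index i to val i" reads back val j at every touched index
lemma pvFoldSet (v : Int → Int) :
    ∀ (l : List Int) (res : List Int), (∀ i ∈ l, 0 ≤ i ∧ i < (res.length : Int)) →
      ∀ j : Nat,
        (l.foldl (fun r i => PySem.List.pySetD r i (v i)) res)[j]? =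
          if (j : Int) ∈ l then some (v j) else res[j]? := by
  intro l
  induction l with
  | nil => intro res _ j; simp
  | cons x xs ih =>
    intro res hr j
    have hx := hr x (by simp)
    have hset : PySem.List.pySetD res x (v x) = res.set x.toNat (v x) :=
      PySem.List.pySetD_of_nonneg _ _ hx.1
    rw [List.foldl_cons, hset,
      ih _ (by intro i hi; have := hr i (by simp [hi]); simpa using this)]
    by_cases hmem : (j : Int) ∈ xs
    · simp [hmem]
    · by_cases hxj : (j : Int) = x
      · have hjx : x.toNat = j := by omega
        rw [if_neg hmem, if_pos (by simp [hxj.symm]), hjx,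
          List.getElem?_set_self (by omega), hxj]
      · rw [if_neg hmem, if_neg (by simp [hxj, hmem]),
          List.getElem?_set_ne (by omega)]

-- B's sweep computes the same "set i to val i" fold
lemma pvSweep (A B : List Int) (hA : ∀ a ∈ A, 0 ≤ a) :
    ∀ (l : List Int) (k : Int) (res : List Int), 0 ≤ k →
      (∀ i ∈ l, PySem.Raise.InRange A.length i) →
      (∀ i ∈ l, k ≤ PySem.List.pyGetD A i 0) →
      l.Pairwise (fun a b => PySem.List.pyGetD A a 0 ≤ PySem.List.pyGetD A b 0) →
      (l.foldl (pvSweepStep A B) (k, pvFibStep^[k.toNat] (0, 1), res)).2.2 =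
        l.foldl (fun r i => PySem.List.pySetD r i (pvVal A B i)) res := by
  intro l
  induction l with
  | nil => intro k res _ _ _ _; rfl
  | cons i l ih =>
    intro k res hk hrange hkle hpw
    have ht0 : 0 ≤ PySem.List.pyGetD A i 0 :=
      hA _ (PySem.List.pyGetD_mem A 0 (hrange i (by simp)))
    have hkt : k ≤ PySem.List.pyGetD A i 0 := hkle i (by simp)
    set t := PySem.List.pyGetD A i 0 with htdef
    have hstep : pvSweepStep A B (k, pvFibStep^[k.toNat] (0, 1), res) i =
        (t, pvFibStep^[t.toNat] (0, 1),
          PySem.List.pySetD res i (pvVal A B i)) := by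
      show (k + (((t - k).toNat : Nat) : Int),
        pvFibStep^[(t - k).toNat] (pvFibStep^[k.toNat] (0, 1)),
        PySem.List.pySetD res i
          (PySem.Int.band (pvFibStep^[(t - k).toNat] (pvFibStep^[k.toNat] (0, 1))).2
            ((1 <<< (PySem.List.pyGetD B i 0).toNat) - 1))) = _
      rw [← Function.iterate_add_apply,
        show (t - k).toNat + k.toNat = t.toNat by omega,
        show k + (((t - k).toNat : Nat) : Int) = t by omega,
        pvIter, pvPair_snd, pvVal, ← htdef]
    rw [List.foldl_cons, List.foldl_cons, hstep,
      ih t _ ht0 (fun j hj => hrange j (by simp [hj]))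
        (fun j hj => (List.pairwise_cons.mp hpw).1 j hj)
        (List.pairwise_cons.mp hpw).2]

theorem pv_main (A B : List Int) (h : Pre_solution A B) :
    solution A B = solution_alt A B := by
  obtain ⟨hne, hA0, ⟨a1, ha1mem, ha1⟩, hlenAB, hB0⟩ := h
  obtain ⟨maxEl, hmax⟩ : ∃ m, PySem.List.max? A (fun x => x) = some m := by
    cases hmx : PySem.List.max? A (fun x => x) with
    | none => exact absurd (by rwa [PySem.List.max?_eq_none_iff] at hmx) hne
    | some m => exact ⟨m, rfl⟩
  have hmaxle : ∀ y ∈ A, y ≤ maxEl := fun y hy => PySem.List.max?_isMax hmax y hy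
  have hmax1 : (1 : Int) ≤ maxEl := le_trans ha1 (hmaxle _ ha1mem)
  have hsz2 : 2 ≤ (maxEl + 1).toNat := by omega
  have hrangeIn : ∀ i : Int, 0 ≤ i → i < (A.length : Int) → PySem.Raise.InRange A.length i := by
    intro i h1 h2; simp [PySem.Raise.InRange]; omega
  simp only [solution, solution_alt, hmax, Option.getD_some]
  rw [show ((((Array.replicate (maxEl + 1).toNat (0 : Int)).setIfInBounds 0 1).setIfInBounds 1 1).size)
      = (maxEl + 1).toNat by simp]
  set sz := (maxEl + 1).toNat with hszdef
  set init := ((Array.replicate sz (0 : Int)).setIfInBounds 0 1).setIfInBounds 1 1 with hinitdef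
  set tbl := List.foldl pvTblStep init (PySem.List.pyRange 2 (sz : Int)) with htbldef
  have htbl : ∀ j : Nat, j < sz → tbl[j]? = some (pvFib j) := fun j hj =>
    pvTbl_final sz hsz2 init hinitdef j hj
  set order := PySem.List.sorted (PySem.List.pyRange 0 (A.length : Int))
      (fun i => PySem.List.pyGetD A i 0) with hOrdDef
  -- A's result loop writes pvVal at each index
  have hcongrA : ∀ x ∈ PySem.List.pyRange 0 (A.length : Int) 1, ∀ acc,
      pvResStep tbl A B acc x = PySem.List.pySetD acc x (pvVal A B x) := by
    intro i hi acc
    obtain ⟨h0i, hiN⟩ := PySem.List.mem_pyRange_one.mp hi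
    have haA : PySem.List.pyGetD A i 0 ∈ A :=
      PySem.List.pyGetD_mem A 0 (hrangeIn i h0i hiN)
    have h0a := hA0 _ haA
    have hlea := hmaxle _ haA
    have hlt : (PySem.List.pyGetD A i 0).toNat < sz := by omega
    have hval : PySem.List.pyGetD tbl.toList (PySem.List.pyGetD A i 0) 0
        = pvFib (PySem.List.pyGetD A i 0).toNat := by
      conv_lhs => rw [show PySem.List.pyGetD A i 0
        = (((PySem.List.pyGetD A i 0).toNat : Nat) : Int) by omega]
      rw [PySem.List.pyGetD_natCast, List.getD_eq_getElem?_getD,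
        Array.getElem?_toList, htbl _ hlt]
      rfl
    simp only [pvResStep, pvVal, hval]
  -- B's sweep writes pvVal at each index
  have hOrd1 : ∀ i ∈ order, PySem.Raise.InRange A.length i := by
    intro i hi
    rw [hOrdDef, PySem.List.mem_sorted] at hi
    obtain ⟨h0i, hiN⟩ := PySem.List.mem_pyRange_one.mp hi
    exact hrangeIn i h0i hiN
  have hOrd2 : ∀ i ∈ order, (0 : Int) ≤ PySem.List.pyGetD A i 0 := fun i hi =>
    hA0 _ (PySem.List.pyGetD_mem A 0 (hOrd1 i hi))
  have hsweep := pvSweep A B hA0 order 0 (List.replicate A.length 0) le_rfl hOrd1 hOrd2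
    (PySem.List.sorted_pairwise _ _)
  simp only [Int.toNat_zero, Function.iterate_zero_apply] at hsweep
  rw [PySem.List.foldl_congr_mem' _ _ _ _ hcongrA, hsweep]
  -- both sides are "set index i to pvVal i" folds over the same index set
  have hcondR : ∀ i ∈ PySem.List.pyRange 0 (A.length : Int) 1,
      0 ≤ i ∧ i < ((List.replicate A.length (0 : Int)).length : Int) := by
    intro i hi
    obtain ⟨h0i, hiN⟩ := PySem.List.mem_pyRange_one.mp hi
    simpa using ⟨h0i, hiN⟩
  have hcondO : ∀ i ∈ order, 0 ≤ i ∧ i < ((List.replicate A.length (0 : Int)).length : Int) := by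
    intro i hi
    rw [hOrdDef, PySem.List.mem_sorted] at hi
    exact hcondR i hi
  apply List.ext_getElem?
  intro j
  rw [pvFoldSet (pvVal A B) _ _ hcondR j, pvFoldSet (pvVal A B) _ _ hcondO j]
  have hmemiff : ((j : Int) ∈ order) ↔ ((j : Int) ∈ PySem.List.pyRange 0 (A.length : Int) 1) := by
    rw [hOrdDef, PySem.List.mem_sorted]
  by_cases hj : (j : Int) ∈ PySem.List.pyRange 0 (A.length : Int) 1
  · rw [if_pos hj, if_pos (hmemiff.mpr hj)]
  · rw [if_neg hj, if_neg (fun hc => hj (hmemiff.mp hc))]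

-- ===== VERDICT (by name: the statement is the Claim_ definition above) =====
theorem solution_spec : Claim_equal_solution := by
  intro A B _ hpre
  unfold Spec_solution
  exact pv_main A B hpre
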